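-- pv_equiv track=rewrite | github.com/ekitrak/Wikipedia-Challenge-Solver | Bwall.py | multiple_word_wiki_link
-- ===== SOURCE A (Python) =====
-- def multiple_word_wiki_link(target_words):
--     target_parts = target_words.split(" ")
--     is_first = True
--     result = ""
--     sep = ""
--     for part in target_parts:
--         if is_first:
--             is_first = False
--         else:
--             sep = "_"
--             part = part.lower()
--         result = result + sep + part
--     return result
-- ===== SOURCE B (Python) =====
-- def multiple_word_wiki_link(target_words):
--     # single pass over characters: spaces become underscores,
--     # everything after the first space is lowercased
--     out = []
--     seen_space = False
--     for c in target_words: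
--         if c == ' ':
--             seen_space = True
--             out.append('_')
--         elif seen_space:
--             out.append(c.lower())
--         else:
--             out.append(c)
--     return ''.join(out)
-- ===== Notes on version B (the rewrite author's own statement) =====
-- stated objective: alternative
-- what changed: Replaces split-into-parts plus a join loop with accumulator/separator state by a single character-level scan that maps each space to an underscore and lowercases every character after the first space.
import Mathlib
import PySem

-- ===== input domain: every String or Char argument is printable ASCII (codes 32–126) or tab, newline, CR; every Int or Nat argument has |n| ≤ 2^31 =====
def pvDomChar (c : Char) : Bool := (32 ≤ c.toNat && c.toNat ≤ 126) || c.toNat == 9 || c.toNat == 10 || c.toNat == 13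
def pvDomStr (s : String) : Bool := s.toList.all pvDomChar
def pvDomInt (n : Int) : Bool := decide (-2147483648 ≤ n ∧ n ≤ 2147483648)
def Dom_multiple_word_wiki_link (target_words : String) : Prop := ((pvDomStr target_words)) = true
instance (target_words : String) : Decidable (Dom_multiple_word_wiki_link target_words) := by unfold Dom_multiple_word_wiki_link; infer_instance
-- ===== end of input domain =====

-- B replaces split-then-join-with-state by a single character scan; objective: alternative (same cost).

-- ===== PORT A =====
-- state: (is_first, result, sep); one step of A's 'for part in target_parts' loop
def pvStepA (st : Bool × List Char × List Char) (part : List Char) : Bool × List Char × List Char :=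
  if st.1 then (false, st.2.1 ++ st.2.2 ++ part, st.2.2)
  else (st.1, st.2.1 ++ ['_'] ++ PySem.Chars.lower part, ['_'])

def multiple_word_wiki_link (target_words : String) : String :=
  let target_parts := PySem.Chars.splitOn target_words.toList [' ']
  let st := target_parts.foldl pvStepA (true, [], [])
  String.ofList st.2.1

-- ===== PORT B =====
-- state: (out, seen_space); one step of B's 'for c in target_words' loop
def pvStepB (st : List Char × Bool) (c : Char) : List Char × Bool :=
  if c = ' ' then (st.1 ++ ['_'], true)
  else if st.2 then (st.1 ++ [PySem.Chars.lowerChar c], st.2)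
  else (st.1 ++ [c], st.2)

def multiple_word_wiki_link_alt (target_words : String) : String :=
  String.ofList (target_words.toList.foldl pvStepB ([], false)).1

-- ===== PRECONDITION & SPEC =====
def Spec_multiple_word_wiki_link (target_words : String) (out : String) : Prop := out = multiple_word_wiki_link_alt target_words
instance (target_words : String) (out : String) : Decidable (Spec_multiple_word_wiki_link target_words out) := by unfold Spec_multiple_word_wiki_link; infer_instance

-- ===== CLAIM (what is proved, stated in full; the proofs are below) =====
def Claim_equal_multiple_word_wiki_link : Prop := ∀ (target_words : String), Dom_multiple_word_wiki_link target_words → Spec_multiple_word_wiki_link target_words (multiple_word_wiki_link target_words)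

-- ===== LEMMAS AND PROOFS =====

-- a simple structural splitter on the single character ' '
def pvSplitSp : List Char → List (List Char)
  | [] => [[]]
  | c :: cs =>
    if c = ' ' then [] :: pvSplitSp cs
    else
      match pvSplitSp cs with
      | [] => [[c]]
      | p :: ps => (c :: p) :: ps

lemma pvSplitSp_ne_nil (l : List Char) : pvSplitSp l ≠ [] := by
  cases l with
  | nil => simp [pvSplitSp]
  | cons c cs =>
    simp only [pvSplitSp]
    split
    · simp
    · cases h : pvSplitSp cs <;> simp

lemma pvSplitOn_go_eq (fuel : Nat) : ∀ (l cur : List Char) (accs : List (List Char)),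
    l.length + 1 ≤ fuel →
    PySem.Chars.splitOn.go [' '] fuel l cur accs =
      accs.reverse ++ (cur.reverse ++ (pvSplitSp l).headI) :: (pvSplitSp l).tail := by
  induction fuel with
  | zero => intro l cur accs h; omega
  | succ f ih =>
    intro l cur accs h
    cases l with
    | nil =>
      simp [PySem.Chars.splitOn.go, pvSplitSp]
    | cons c rest =>
      rw [PySem.Chars.splitOn.go]
      by_cases hc : c = ' '
      · subst hc
        have hpre : List.isPrefixOf [' '] (' ' :: rest) = true := by
          simp [List.isPrefixOf]
        simp only [hpre, if_true, List.length_cons, List.drop_succ_cons, List.length_nil, List.drop_zero]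
        rw [ih rest [] (cur.reverse :: accs) (by simpa using Nat.le_of_succ_le_succ h)]
        obtain ⟨p, ps, hps⟩ : ∃ p ps, pvSplitSp rest = p :: ps := by
          cases hx : pvSplitSp rest with
          | nil => exact absurd hx (pvSplitSp_ne_nil rest)
          | cons p ps => exact ⟨p, ps, rfl⟩
        simp [pvSplitSp, hps]
      · have hpre : List.isPrefixOf [' '] (c :: rest) = false := by
          simp [List.isPrefixOf]
          intro hc'; exact absurd hc'.symm hc
        simp only [hpre, Bool.false_eq_true, if_false]
        rw [ih rest (c :: cur) accs (by simpa using Nat.le_of_succ_le_succ h)]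
        obtain ⟨p, ps, hps⟩ : ∃ p ps, pvSplitSp rest = p :: ps := by
          cases hx : pvSplitSp rest with
          | nil => exact absurd hx (pvSplitSp_ne_nil rest)
          | cons p ps => exact ⟨p, ps, rfl⟩
        simp [pvSplitSp, hps, hc]

lemma pvSplitOn_eq (l : List Char) :
    PySem.Chars.splitOn l [' '] = ((pvSplitSp l).headI) :: (pvSplitSp l).tail := by
  unfold PySem.Chars.splitOn
  rw [pvSplitOn_go_eq (l.length + 1) l [] [] (le_refl _)]
  simp

-- A's loop after the first part: result accumulates '_' ++ lower part for each part
lemma pvFoldA_rest (t : List (List Char)) : ∀ (r s : List Char),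
    (t.foldl pvStepA (false, r, s)).2.1 =
      r ++ t.flatMap (fun q => '_' :: PySem.Chars.lower q) := by
  induction t with
  | nil => intro r s; simp
  | cons q t ih =>
    intro r s
    simp only [List.foldl_cons, pvStepA, if_neg (Bool.false_ne_true)]
    rw [ih]
    simp

-- the character-wise image of B once a space has been seen
def pvPost (l : List Char) : List Char :=
  l.map (fun c => if c = ' ' then '_' else PySem.Chars.lowerChar c)

lemma pvFoldB_post (l : List Char) : ∀ (out : List Char),
    l.foldl pvStepB (out, true) = (out ++ pvPost l, true) := by
  induction l with
  | nil => intro out; simp [pvPost]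
  | cons c cs ih =>
    intro out
    by_cases hc : c = ' '
    · subst hc
      simp only [List.foldl_cons, pvStepB, if_true]
      rw [ih]
      simp [pvPost]
    · simp only [List.foldl_cons, pvStepB, if_neg hc, if_true]
      rw [ih]
      simp [pvPost, hc]

-- the character-wise image of B before a space has been seen
def pvPre : List Char → List Char
  | [] => []
  | c :: cs => if c = ' ' then '_' :: pvPost cs else c :: pvPre cs

lemma pvFoldB_pre (l : List Char) : ∀ (out : List Char),
    (l.foldl pvStepB (out, false)).1 = out ++ pvPre l := by
  induction l with
  | nil => intro out; simp [pvPre]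
  | cons c cs ih =>
    intro out
    by_cases hc : c = ' '
    · subst hc
      simp only [List.foldl_cons, pvStepB, if_true]
      rw [pvFoldB_post]
      simp [pvPre]
    · simp only [List.foldl_cons, pvStepB, if_neg hc, Bool.false_eq_true, if_false]
      rw [ih]
      simp [pvPre, hc]

lemma pvPost_eq (l : List Char) :
    pvPost l = PySem.Chars.lower (pvSplitSp l).headI ++
      (pvSplitSp l).tail.flatMap (fun q => '_' :: PySem.Chars.lower q) := by
  induction l with
  | nil => simp [pvPost, pvSplitSp, PySem.Chars.lower]
  | cons c cs ih =>
    obtain ⟨p, ps, hps⟩ : ∃ p ps, pvSplitSp cs = p :: ps := by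
      cases hx : pvSplitSp cs with
      | nil => exact absurd hx (pvSplitSp_ne_nil cs)
      | cons p ps => exact ⟨p, ps, rfl⟩
    by_cases hc : c = ' '
    · subst hc
      simp only [pvPost, List.map_cons, pvSplitSp, hps]
      rw [← pvPost] at *
      simp [PySem.Chars.lower, ih, hps]
    · simp only [pvPost, List.map_cons, pvSplitSp, hps, if_neg hc]
      rw [← pvPost] at *
      simp [PySem.Chars.lower, ih, hps]

lemma pvPre_eq (l : List Char) :
    pvPre l = (pvSplitSp l).headI ++
      (pvSplitSp l).tail.flatMap (fun q => '_' :: PySem.Chars.lower q) := by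
  induction l with
  | nil => simp [pvPre, pvSplitSp]
  | cons c cs ih =>
    obtain ⟨p, ps, hps⟩ : ∃ p ps, pvSplitSp cs = p :: ps := by
      cases hx : pvSplitSp cs with
      | nil => exact absurd hx (pvSplitSp_ne_nil cs)
      | cons p ps => exact ⟨p, ps, rfl⟩
    by_cases hc : c = ' '
    · subst hc
      simp only [pvPre, pvSplitSp, hps]
      rw [pvPost_eq]
      simp [hps]
    · simp only [pvPre, pvSplitSp, hps, if_neg hc]
      rw [ih]
      simp [hps]

-- ===== VERDICT (by name: the statement is the Claim_ definition above) =====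
theorem multiple_word_wiki_link_spec : Claim_equal_multiple_word_wiki_link := by
  intro s _
  unfold Spec_multiple_word_wiki_link multiple_word_wiki_link multiple_word_wiki_link_alt
  rw [pvSplitOn_eq]
  simp only [List.foldl_cons, pvStepA, if_true]
  rw [pvFoldA_rest, pvFoldB_pre, pvPre_eq]
  simp
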